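-- pv_equiv track=rewrite | github.com/JunOnJuly/BaekJoon | 백준/Platinum/3176. 도로 네트워크/도로 네트워크.py | equailze_depth
-- ===== SOURCE A (Python) =====
-- def equailze_depth(node_1, node_2, depth_list, tree, sparse_table):
--     # 각 노드의 깊이
--     depth_1 = depth_list[node_1]
--     depth_2 = depth_list[node_2]
--     # 맞춰질 높이
--     depth = min(depth_1, depth_2)
--     # 최소 최대 길이 선언
--     min_dist = 1000000
--     max_dist = 0
--     # 희소배열 사용
--     while depth_1 != depth_2:
--         # 1 의 깊이가 깊으면 node 1 끌어올리기
--         if depth_1 > depth_2: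
--             # 깊이 차이
--             sub_depth = depth_1-depth_2
--             # 깊이 차이 2진수
--             bin_sub_depth = bin(sub_depth)[2:]
--             # 순회
--             for num_idx, num in enumerate(reversed(bin_sub_depth)):
--                 # 1 이면 노드 이동
--                 if int(num):
--                     min_dist = min(min_dist, sparse_table[num_idx][node_1][1])
--                     max_dist = max(max_dist, sparse_table[num_idx][node_1][2])
--                     node_1 = sparse_table[num_idx][node_1][0]
--                     depth_1 = depth_list[node_1]
--         # 2 의 깊이가 깊으면 node 2 끌어올리기
--         elif depth_1 < depth_2:
--             # 깊이 차이
--             sub_depth = depth_2-depth_1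
--             # 깊이 차이 2진수
--             bin_sub_depth = bin(sub_depth)[2:]
--             # 순회
--             for num_idx, num in enumerate(reversed(bin_sub_depth)):
--                 # 1 이면 노드 이동
--                 if int(num):
--                     min_dist = min(min_dist, sparse_table[num_idx][node_2][1])
--                     max_dist = max(max_dist, sparse_table[num_idx][node_2][2])
--                     node_2 = sparse_table[num_idx][node_2][0]
--                     depth_2 = depth_list[node_2]
--     return node_1, node_2, depth, min_dist, max_dist
-- ===== SOURCE B (Python) =====
-- def equailze_depth(node_1, node_2, depth_list, tree, sparse_table):
--     # Different algorithm: no binary lifting at all -- walk the deeper node up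
--     # one level at a time through the level-0 parent entries, diff times.
--     depth_1 = depth_list[node_1]
--     depth_2 = depth_list[node_2]
--     depth = min(depth_1, depth_2)
--     min_dist = 1000000
--     max_dist = 0
--     if depth_1 > depth_2:
--         for _ in range(depth_1 - depth_2):
--             e = sparse_table[0][node_1]
--             min_dist = min(min_dist, e[1])
--             max_dist = max(max_dist, e[2])
--             node_1 = e[0]
--     else:
--         for _ in range(depth_2 - depth_1):
--             e = sparse_table[0][node_2]
--             min_dist = min(min_dist, e[1])
--             max_dist = max(max_dist, e[2])
--             node_2 = e[0]
--     return node_1, node_2, depth, min_dist, max_dist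
-- ===== Notes on version B (the rewrite author's own statement) =====
-- stated objective: simpler
-- what changed: B drops binary lifting altogether: instead of decomposing the depth difference into powers of two and jumping through higher sparse-table levels, it walks the single deeper node up one level at a time through the level-0 parent entries, diff times; on a consistent binary-lifting table this visits exactly the same edges.
import Mathlib
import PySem

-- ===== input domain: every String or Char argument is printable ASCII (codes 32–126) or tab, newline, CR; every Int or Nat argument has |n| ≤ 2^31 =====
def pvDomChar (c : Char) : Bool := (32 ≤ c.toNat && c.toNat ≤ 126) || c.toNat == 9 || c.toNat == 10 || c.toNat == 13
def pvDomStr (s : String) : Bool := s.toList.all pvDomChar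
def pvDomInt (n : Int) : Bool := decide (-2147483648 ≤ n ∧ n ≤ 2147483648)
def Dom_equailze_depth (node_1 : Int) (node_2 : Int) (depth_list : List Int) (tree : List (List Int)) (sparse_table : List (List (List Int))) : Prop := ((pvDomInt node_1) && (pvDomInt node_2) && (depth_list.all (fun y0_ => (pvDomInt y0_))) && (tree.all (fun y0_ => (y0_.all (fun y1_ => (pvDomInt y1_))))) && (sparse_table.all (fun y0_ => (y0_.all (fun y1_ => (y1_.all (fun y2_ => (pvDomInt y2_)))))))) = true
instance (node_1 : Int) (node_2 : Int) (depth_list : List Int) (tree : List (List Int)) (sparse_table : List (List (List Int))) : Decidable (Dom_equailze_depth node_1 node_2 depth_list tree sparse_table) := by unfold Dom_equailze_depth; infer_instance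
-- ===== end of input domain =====

-- B replaces A's binary lifting (while-loop + binary-string scan over sparse-table levels)
-- by a plain one-level-at-a-time walk of the deeper node through the level-0 parent
-- entries; proved equal on Pre_ (valid indices and, when depths differ, a consistent
-- binary-lifting table).

-- shared lookup helpers: depth_list[i] and sparse_table[k][i][j] with Python indexing,
-- defaulting to 0 / [] out of range (Pre_ keeps every access performed in range)
def pvGetD (xs : List Int) (i : Int) : Int := PySem.List.pyGetD xs i 0
def pvTbl (st : List (List (List Int))) (k : Nat) (i : Int) (j : Nat) : Int :=
  PySem.List.pyGetD (PySem.List.pyGetD (PySem.List.pyGetD st (k : Int) []) i []) (j : Int) 0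

-- ===== PORT A =====
-- bin(n)[2:] ported by hand as the list of binary digits (0/1), most significant first:
-- exact for n > 0 (the only calls A makes); pvBin 0 = [0] matching bin(0)[2:] = "0".
def pvBinAux (n : Nat) : List Nat :=
  if h : n = 0 then [] else pvBinAux (n / 2) ++ [n % 2]
termination_by n
decreasing_by exact Nat.div_lt_self (Nat.pos_of_ne_zero h) one_lt_two

def pvBin (n : Nat) : List Nat := if n = 0 then [0] else pvBinAux n

-- the inner 'for num_idx, num in enumerate(reversed(bin_sub_depth))' loop of A:
-- bits is the reversed digit list, k the running enumerate counter; state is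
-- (node, its depth, min_dist, max_dist), updated exactly as A does
def pvPassA (dl : List Int) (st : List (List (List Int))) :
    List Nat → Nat → Int → Int → Int → Int → Int × Int × Int × Int
  | [], _, node, dep, mn, mx => (node, dep, mn, mx)
  | b :: bs, k, node, dep, mn, mx =>
    if b ≠ 0 then
      pvPassA dl st bs (k + 1) (pvTbl st k node 0) (pvGetD dl (pvTbl st k node 0))
        (min mn (pvTbl st k node 1)) (max mx (pvTbl st k node 2))
    else
      pvPassA dl st bs (k + 1) node dep mn mx

-- A's 'while depth_1 != depth_2' loop; Python has no fuel — inside Pre_ the given fuel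
-- (depth difference + 1) is enough, and outside Pre_ the Python loop may not terminate
def pvWhileA (dl : List Int) (st : List (List (List Int))) :
    Nat → Int → Int → Int → Int → Int → Int → Int × Int × Int × Int × Int × Int
  | 0, n1, n2, d1, d2, mn, mx => (n1, n2, d1, d2, mn, mx)
  | f + 1, n1, n2, d1, d2, mn, mx =>
    if d1 = d2 then (n1, n2, d1, d2, mn, mx)
    else if d1 > d2 then
      let t := pvPassA dl st ((pvBin (d1 - d2).toNat).reverse) 0 n1 d1 mn mx
      pvWhileA dl st f t.1 n2 t.2.1 d2 t.2.2.1 t.2.2.2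
    else
      let t := pvPassA dl st ((pvBin (d2 - d1).toNat).reverse) 0 n2 d2 mn mx
      pvWhileA dl st f n1 t.1 d1 t.2.1 t.2.2.1 t.2.2.2

def equailze_depth (node_1 : Int) (node_2 : Int) (depth_list : List Int) (tree : List (List Int)) (sparse_table : List (List (List Int))) : Int × Int × Int × Int × Int :=
  let depth_1 := pvGetD depth_list node_1
  let depth_2 := pvGetD depth_list node_2
  let depth := min depth_1 depth_2
  let t := pvWhileA depth_list sparse_table ((depth_1 - depth_2).natAbs + 1)
      node_1 node_2 depth_1 depth_2 1000000 0
  (t.1, t.2.1, depth, t.2.2.2.2.1, t.2.2.2.2.2)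

-- ===== PORT B =====
-- B's 'for _ in range(diff)' loop: walk one level-0 parent step per iteration,
-- carrying (node, min_dist, max_dist); the Nat argument is the remaining step count
def pvWalkB (st : List (List (List Int))) :
    Nat → Int → Int → Int → Int × Int × Int
  | 0, node, mn, mx => (node, mn, mx)
  | m + 1, node, mn, mx =>
    pvWalkB st m (pvTbl st 0 node 0) (min mn (pvTbl st 0 node 1)) (max mx (pvTbl st 0 node 2))

def equailze_depth_alt (node_1 : Int) (node_2 : Int) (depth_list : List Int) (tree : List (List Int)) (sparse_table : List (List (List Int))) : Int × Int × Int × Int × Int :=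
  let depth_1 := pvGetD depth_list node_1
  let depth_2 := pvGetD depth_list node_2
  let depth := min depth_1 depth_2
  if depth_1 > depth_2 then
    let t := pvWalkB sparse_table (depth_1 - depth_2).toNat node_1 1000000 0
    (t.1, node_2, depth, t.2.1, t.2.2)
  else
    let t := pvWalkB sparse_table (depth_2 - depth_1).toNat node_2 1000000 0
    (node_1, t.1, depth, t.2.1, t.2.2)

-- ===== PRECONDITION & SPEC =====
-- Pre_ excludes inputs where A raises (node index out of range, missing/short sparse-table
-- rows reached while lifting) or loops forever, and — when the two depths differ — negative
-- (wraparound) node indices and sparse tables that are not a consistent binary-lifting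
-- table of the depth list: on such accidental tables the min/max edge values A collects
-- depend on which table levels happen to be read, a corner no caller would specify.
def pvTableOK (dl : List Int) (st : List (List (List Int))) (D : Int) (K : Nat) : Prop :=
  K ≤ st.length ∧
  (∀ k, k < K → (PySem.List.pyGetD st (k : Int) []).length = dl.length ∧
    ∀ i, i < dl.length →
      3 ≤ (PySem.List.pyGetD (PySem.List.pyGetD st (k : Int) []) (i : Int) []).length) ∧
  (∀ i : Nat, i < dl.length → D < pvGetD dl i →
    0 ≤ pvTbl st 0 i 0 ∧ pvTbl st 0 i 0 < (dl.length : Int) ∧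
    pvGetD dl (pvTbl st 0 i 0) = pvGetD dl i - 1) ∧
  (∀ k, k < K - 1 → ∀ i : Nat, i < dl.length → D + (2 : Int) ^ (k + 1) ≤ pvGetD dl i →
    pvTbl st (k + 1) i 0 = pvTbl st k (pvTbl st k i 0) 0 ∧
    pvTbl st (k + 1) i 1 = min (pvTbl st k i 1) (pvTbl st k (pvTbl st k i 0) 1) ∧
    pvTbl st (k + 1) i 2 = max (pvTbl st k i 2) (pvTbl st k (pvTbl st k i 0) 2))

def Pre_equailze_depth (node_1 : Int) (node_2 : Int) (depth_list : List Int) (tree : List (List Int)) (sparse_table : List (List (List Int))) : Prop :=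
  PySem.Raise.InRange depth_list.length node_1 ∧
  PySem.Raise.InRange depth_list.length node_2 ∧
  (pvGetD depth_list node_1 ≠ pvGetD depth_list node_2 →
    0 ≤ node_1 ∧ 0 ≤ node_2 ∧
    pvTableOK depth_list sparse_table
      (min (pvGetD depth_list node_1) (pvGetD depth_list node_2))
      (PySem.Int.bitLength (pvGetD depth_list node_1 - pvGetD depth_list node_2)))

instance (node_1 : Int) (node_2 : Int) (depth_list : List Int) (tree : List (List Int)) (sparse_table : List (List (List Int))) : Decidable (Pre_equailze_depth node_1 node_2 depth_list tree sparse_table) := by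
  unfold Pre_equailze_depth pvTableOK PySem.Raise.InRange; infer_instance

def pvWitness_equailze_depth : Int × Int × List Int × List (List Int) × List (List (List Int)) :=
  (1, 0, [0, 1], [], [[[0, 7, 7], [0, 5, 5]]])

def Spec_equailze_depth (node_1 : Int) (node_2 : Int) (depth_list : List Int) (tree : List (List Int)) (sparse_table : List (List (List Int))) (out : Int × Int × Int × Int × Int) : Prop := out = equailze_depth_alt node_1 node_2 depth_list tree sparse_table
instance (node_1 : Int) (node_2 : Int) (depth_list : List Int) (tree : List (List Int)) (sparse_table : List (List (List Int))) (out : Int × Int × Int × Int × Int) : Decidable (Spec_equailze_depth node_1 node_2 depth_list tree sparse_table out) := by unfold Spec_equailze_depth; infer_instance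

-- ===== CLAIM (what is proved, stated in full; the proofs are below) =====
def Claim_equal_equailze_depth : Prop := ∀ (node_1 : Int) (node_2 : Int) (depth_list : List Int) (tree : List (List Int)) (sparse_table : List (List (List Int))), Dom_equailze_depth node_1 node_2 depth_list tree sparse_table → Pre_equailze_depth node_1 node_2 depth_list tree sparse_table → Spec_equailze_depth node_1 node_2 depth_list tree sparse_table (equailze_depth node_1 node_2 depth_list tree sparse_table)

-- ===== LEMMAS AND PROOFS =====

-- the level-0 jump and the one-level lifting step; A jumps 2^k levels at once via the
-- table, B applies pvStep st 0 once per level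
def pvJ (st : List (List (List Int))) (i : Int) : Int := pvTbl st 0 i 0
def pvStep (st : List (List (List Int))) (k : Nat) (s : Int × Int × Int) : Int × Int × Int :=
  (pvTbl st k s.1 0, min s.2.1 (pvTbl st k s.1 1), max s.2.2 (pvTbl st k s.1 2))

theorem pvWalkB_eq (st : List (List (List Int))) :
    ∀ (m : Nat) (node mn mx : Int),
      pvWalkB st m node mn mx = (pvStep st 0)^[m] (node, mn, mx) := by
  intro m
  induction m with
  | zero => intro node mn mx; rfl
  | succ m ih =>
    intro node mn mx
    rw [Function.iterate_succ_apply]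
    exact ih _ _ _

theorem pvStep_node (st : List (List (List Int))) (m : Nat) (s : Int × Int × Int) :
    ((pvStep st 0)^[m] s).1 = (pvJ st)^[m] s.1 := by
  induction m generalizing s with
  | zero => rfl
  | succ m ih => rw [Function.iterate_succ_apply, Function.iterate_succ_apply, ih]; rfl

theorem pvIter (dl : List Int) (st : List (List (List Int))) (D : Int)
    (H0 : ∀ i : Int, 0 ≤ i → i < dl.length → D < pvGetD dl i →
      0 ≤ pvJ st i ∧ pvJ st i < (dl.length : Int) ∧ pvGetD dl (pvJ st i) = pvGetD dl i - 1) :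
    ∀ m : Nat, ∀ i : Int, 0 ≤ i → i < dl.length → D + m ≤ pvGetD dl i →
      0 ≤ (pvJ st)^[m] i ∧ (pvJ st)^[m] i < (dl.length : Int) ∧
      pvGetD dl ((pvJ st)^[m] i) = pvGetD dl i - m := by
  intro m
  induction m with
  | zero => intro i h0 h1 _; simpa using ⟨h0, h1⟩
  | succ m ih =>
    intro i h0 h1 hd
    have hlt : D < pvGetD dl i := by push_cast at hd ⊢; omega
    obtain ⟨j0, j1, j2⟩ := H0 i h0 h1 hlt
    have hrec := ih (pvJ st i) j0 j1 (by push_cast at hd ⊢; omega)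
    rw [Function.iterate_succ_apply]
    refine ⟨hrec.1, hrec.2.1, ?_⟩
    rw [hrec.2.2, j2]; push_cast; ring

theorem pvStepPow (dl : List Int) (st : List (List (List Int))) (D : Int) (K : Nat)
    (H0 : ∀ i : Int, 0 ≤ i → i < dl.length → D < pvGetD dl i →
      0 ≤ pvJ st i ∧ pvJ st i < (dl.length : Int) ∧ pvGetD dl (pvJ st i) = pvGetD dl i - 1)
    (HD : ∀ k, k + 1 < K → ∀ i : Int, 0 ≤ i → i < dl.length →
      D + (2 : Int) ^ (k + 1) ≤ pvGetD dl i →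
      pvTbl st (k + 1) i 0 = pvTbl st k (pvTbl st k i 0) 0 ∧
      pvTbl st (k + 1) i 1 = min (pvTbl st k i 1) (pvTbl st k (pvTbl st k i 0) 1) ∧
      pvTbl st (k + 1) i 2 = max (pvTbl st k i 2) (pvTbl st k (pvTbl st k i 0) 2)) :
    ∀ k, k < K → ∀ s : Int × Int × Int, 0 ≤ s.1 → s.1 < dl.length →
      D + (2 : Int) ^ k ≤ pvGetD dl s.1 → pvStep st k s = (pvStep st 0)^[2 ^ k] s := by
  intro k
  induction k with
  | zero => intro _ s _ _ _; simp
  | succ k ih =>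
    intro hK s h0 h1 hd
    have hkK : k < K := by omega
    have hdk : D + (2 : Int) ^ k ≤ pvGetD dl s.1 := by
      have h1 : (0 : Int) < 2 ^ k := by positivity
      have h2 : (2 : Int) ^ k + 2 ^ k = 2 ^ (k + 1) := by ring
      linarith [hd]
    obtain ⟨e0, e1, e2⟩ := HD k hK s.1 h0 h1 hd
    have hstep := ih hkK s h0 h1 hdk
    have hnode : pvTbl st k s.1 0 = (pvJ st)^[2 ^ k] s.1 := by
      have := congrArg Prod.fst hstep
      simpa [pvStep, pvStep_node] using this
    have hiter := pvIter dl st D H0 (2 ^ k) s.1 h0 h1 (by push_cast; linarith [hdk])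
    rw [← hnode] at hiter
    have hdj : D + (2 : Int) ^ k ≤ pvGetD dl (pvTbl st k s.1 0) := by
      rw [hiter.2.2]
      have h2 : (2 : Int) ^ k + 2 ^ k = 2 ^ (k + 1) := by ring
      push_cast
      linarith [hd]
    have hstep2 := ih hkK (pvStep st k s) (by simpa [pvStep] using hiter.1)
      (by simpa [pvStep] using hiter.2.1) (by simpa [pvStep] using hdj)
    have hsplit : pvStep st (k + 1) s = pvStep st k (pvStep st k s) := by
      simp only [pvStep, e0, e1, e2]
      exact Prod.ext rfl (Prod.ext (min_assoc _ _ _).symm (max_assoc _ _ _).symm)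
    rw [hsplit, hstep2, hstep, ← Function.iterate_add_apply]
    congr 1
    ring

theorem pvBinAux_cons (d : Nat) (h : d ≠ 0) :
    (pvBinAux d).reverse = d % 2 :: (pvBinAux (d / 2)).reverse := by
  rw [pvBinAux, dif_neg h, List.reverse_append]; rfl

theorem pvPassA_spec (dl : List Int) (st : List (List (List Int))) (D : Int) (K : Nat)
    (H0 : ∀ i : Int, 0 ≤ i → i < dl.length → D < pvGetD dl i →
      0 ≤ pvJ st i ∧ pvJ st i < (dl.length : Int) ∧ pvGetD dl (pvJ st i) = pvGetD dl i - 1)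
    (HD : ∀ k, k + 1 < K → ∀ i : Int, 0 ≤ i → i < dl.length →
      D + (2 : Int) ^ (k + 1) ≤ pvGetD dl i →
      pvTbl st (k + 1) i 0 = pvTbl st k (pvTbl st k i 0) 0 ∧
      pvTbl st (k + 1) i 1 = min (pvTbl st k i 1) (pvTbl st k (pvTbl st k i 0) 1) ∧
      pvTbl st (k + 1) i 2 = max (pvTbl st k i 2) (pvTbl st k (pvTbl st k i 0) 2)) :
    ∀ d k : Nat, ∀ node dep mn mx : Int,
      PySem.Int.bitLength (d : Int) + k ≤ K → 0 ≤ node → node < dl.length →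
      D + (d : Int) * 2 ^ k ≤ pvGetD dl node → dep = pvGetD dl node →
      pvPassA dl st ((pvBinAux d).reverse) k node dep mn mx =
        (((pvStep st 0)^[d * 2 ^ k] (node, mn, mx)).1,
         pvGetD dl ((pvStep st 0)^[d * 2 ^ k] (node, mn, mx)).1,
         ((pvStep st 0)^[d * 2 ^ k] (node, mn, mx)).2.1,
         ((pvStep st 0)^[d * 2 ^ k] (node, mn, mx)).2.2) := by
  intro d
  induction d using Nat.strong_induction_on with
  | _ d ih =>
    intro k node dep mn mx hK h0 h1 hd hdep
    by_cases hz : d = 0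
    · subst hz
      rw [show pvBinAux 0 = [] from by rw [pvBinAux]; simp]
      simp only [List.reverse_nil, pvPassA, Nat.zero_mul, Function.iterate_zero, id_eq]
      rw [hdep]
    · have hq : d / 2 < d := Nat.div_lt_self (Nat.pos_of_ne_zero hz) one_lt_two
      have hbl : PySem.Int.bitLength (d : Int) =
          PySem.Int.bitLength ((d / 2 : Nat) : Int) + 1 :=
        PySem.Int.bitLength_natCast (Nat.pos_of_ne_zero hz)
      have hkK : k < K := by omega
      have h2k : (0 : Int) < 2 ^ k := by positivity
      rw [pvBinAux_cons d hz]
      rcases Nat.mod_two_eq_zero_or_one d with hb | hb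
      · -- even: bit 0, no move at this level
        have hd2 : d = 2 * (d / 2) := by omega
        rw [hb]
        simp only [pvPassA, ne_eq, not_true_eq_false, if_false]
        have hdc : (d : Int) = 2 * ((d / 2 : Nat) : Int) := by omega
        have hc : ((d / 2 : Nat) : Int) * 2 ^ (k + 1) = (d : Int) * 2 ^ k := by
          rw [hdc]; ring
        have := ih (d / 2) hq (k + 1) node dep mn mx (by omega) h0 h1
          (by rw [hc]; exact hd) hdep
        rw [this]
        have hmul : d / 2 * 2 ^ (k + 1) = d * 2 ^ k := by
          have h2 : d / 2 * 2 = d := by omega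
          calc d / 2 * 2 ^ (k + 1) = d / 2 * 2 * 2 ^ k := by ring
            _ = d * 2 ^ k := by rw [h2]
        rw [hmul]
      · -- odd: bit 1, lift 2^k levels
        have hd2 : d = 2 * (d / 2) + 1 := by omega
        rw [hb]
        simp only [pvPassA, ne_eq, one_ne_zero, not_false_eq_true, if_true]
        have hdk : D + (2 : Int) ^ k ≤ pvGetD dl node := by
          have h1d : (1 : Int) ≤ (d : Int) := by exact_mod_cast Nat.pos_of_ne_zero hz
          have hmm := mul_le_mul_of_nonneg_right h1d (le_of_lt h2k)
          rw [one_mul] at hmm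
          linarith [hd, hmm]
        have hstep := pvStepPow dl st D K H0 HD k hkK (node, mn, mx) h0 h1 hdk
        have hnode : pvTbl st k node 0 = (pvJ st)^[2 ^ k] node := by
          have := congrArg Prod.fst hstep
          simpa [pvStep, pvStep_node] using this
        have hiter := pvIter dl st D H0 (2 ^ k) node h0 h1 (by push_cast; linarith [hdk])
        rw [← hnode] at hiter
        have harg : (pvTbl st k node 0, min mn (pvTbl st k node 1),
            max mx (pvTbl st k node 2)) = pvStep st k (node, mn, mx) := rfl
        have hrec := ih (d / 2) hq (k + 1) (pvTbl st k node 0)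
          (pvGetD dl (pvTbl st k node 0)) (min mn (pvTbl st k node 1))
          (max mx (pvTbl st k node 2)) (by omega) hiter.1 (by exact_mod_cast hiter.2.1)
          (by rw [hiter.2.2]
              have hdc : (d : Int) = 2 * ((d / 2 : Nat) : Int) + 1 := by omega
              have hc : ((d / 2 : Nat) : Int) * 2 ^ (k + 1) + 2 ^ k = (d : Int) * 2 ^ k := by
                rw [hdc]; ring
              push_cast at hc ⊢
              linarith [hd, hc]) rfl
        rw [hrec]
        have hcomp : (pvStep st 0)^[d / 2 * 2 ^ (k + 1)]
            (pvTbl st k node 0, min mn (pvTbl st k node 1), max mx (pvTbl st k node 2)) =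
            (pvStep st 0)^[d * 2 ^ k] (node, mn, mx) := by
          rw [harg, hstep, ← Function.iterate_add_apply]
          congr 1
          have h2 : d / 2 * 2 + 1 = d := by omega
          calc d / 2 * 2 ^ (k + 1) + 2 ^ k = (d / 2 * 2 + 1) * 2 ^ k := by ring
            _ = d * 2 ^ k := by rw [h2]
        rw [hcomp]

theorem pvWhileA_stop (dl : List Int) (st : List (List (List Int))) (f : Nat) (hf : 0 < f)
    (n1 n2 d mn mx : Int) :
    pvWhileA dl st f n1 n2 d d mn mx = (n1, n2, d, d, mn, mx) := by
  cases f with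
  | zero => omega
  | succ f => simp [pvWhileA]

-- A's one pass through the while-body lifts the deeper node exactly dn level-0 steps
theorem pvMainPass (dl : List Int) (st : List (List (List Int))) (D : Int) (K : Nat)
    (H0 : ∀ i : Int, 0 ≤ i → i < dl.length → D < pvGetD dl i →
      0 ≤ pvJ st i ∧ pvJ st i < (dl.length : Int) ∧ pvGetD dl (pvJ st i) = pvGetD dl i - 1)
    (HD : ∀ k, k + 1 < K → ∀ i : Int, 0 ≤ i → i < dl.length →
      D + (2 : Int) ^ (k + 1) ≤ pvGetD dl i →
      pvTbl st (k + 1) i 0 = pvTbl st k (pvTbl st k i 0) 0 ∧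
      pvTbl st (k + 1) i 1 = min (pvTbl st k i 1) (pvTbl st k (pvTbl st k i 0) 1) ∧
      pvTbl st (k + 1) i 2 = max (pvTbl st k i 2) (pvTbl st k (pvTbl st k i 0) 2))
    (nd : Int) (h0 : 0 ≤ nd) (h1 : nd < dl.length) (dn : Nat) (hdn : dn ≠ 0)
    (hK : PySem.Int.bitLength (dn : Int) ≤ K)
    (hdep : pvGetD dl nd = D + dn) :
    pvPassA dl st ((pvBinAux dn).reverse) 0 nd (pvGetD dl nd) 1000000 0 =
      (((pvStep st 0)^[dn] (nd, 1000000, 0)).1, D,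
       ((pvStep st 0)^[dn] (nd, 1000000, 0)).2.1,
       ((pvStep st 0)^[dn] (nd, 1000000, 0)).2.2) := by
  have hnode : ((pvStep st 0)^[dn] (nd, 1000000, 0)).1 = (pvJ st)^[dn] nd :=
    pvStep_node st dn (nd, 1000000, 0)
  have hiter := pvIter dl st D H0 dn nd h0 h1 (by omega)
  have hdlr : pvGetD dl ((pvStep st 0)^[dn] (nd, 1000000, 0)).1 = D := by
    rw [hnode, hiter.2.2, hdep]; ring
  have hpass := pvPassA_spec dl st D K H0 HD dn 0 nd (pvGetD dl nd) 1000000 0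
    (by simpa using hK) h0 h1 (by rw [pow_zero, mul_one]; omega) rfl
  rw [show dn * 2 ^ 0 = dn from by simp] at hpass
  rw [hpass, hdlr]

-- ===== VERDICT (by name: the statement is the Claim_ definition above) =====
theorem equailze_depth_spec : Claim_equal_equailze_depth := by
  intro n1 n2 dl tree st _hDom hPre
  obtain ⟨hIn1, hIn2, hNE⟩ := hPre
  unfold Spec_equailze_depth
  by_cases heq : pvGetD dl n1 = pvGetD dl n2
  · simp only [equailze_depth, equailze_depth_alt, heq]
    rw [sub_self, Int.natAbs_zero, Nat.zero_add]
    rw [pvWhileA_stop dl st 1 one_pos]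
    simp [pvWalkB]
  · have h' := hNE heq
    obtain ⟨h01, h02, hT⟩ := h'
    unfold pvTableOK at hT
    obtain ⟨hKlen, hRows, H0n, HDn⟩ := hT
    have H0 : ∀ i : Int, 0 ≤ i → i < dl.length →
        min (pvGetD dl n1) (pvGetD dl n2) < pvGetD dl i →
        0 ≤ pvJ st i ∧ pvJ st i < (dl.length : Int) ∧
        pvGetD dl (pvJ st i) = pvGetD dl i - 1 := by
      intro i hi0 hin hD
      have h := H0n i.toNat (by omega) (by rwa [Int.toNat_of_nonneg hi0])
      rw [Int.toNat_of_nonneg hi0] at h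
      simpa [pvJ] using h
    have HD : ∀ k, k + 1 < PySem.Int.bitLength (pvGetD dl n1 - pvGetD dl n2) →
        ∀ i : Int, 0 ≤ i → i < dl.length →
        min (pvGetD dl n1) (pvGetD dl n2) + (2 : Int) ^ (k + 1) ≤ pvGetD dl i →
        pvTbl st (k + 1) i 0 = pvTbl st k (pvTbl st k i 0) 0 ∧
        pvTbl st (k + 1) i 1 = min (pvTbl st k i 1) (pvTbl st k (pvTbl st k i 0) 1) ∧
        pvTbl st (k + 1) i 2 = max (pvTbl st k i 2) (pvTbl st k (pvTbl st k i 0) 2) := by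
      intro k hk i hi0 hin hD
      have h := HDn k (by omega) i.toNat (by omega) (by rwa [Int.toNat_of_nonneg hi0])
      rwa [Int.toNat_of_nonneg hi0] at h
    rcases lt_or_gt_of_ne heq with hlt | hgt
    · -- node_2 is deeper
      set dn : Nat := (pvGetD dl n2 - pvGetD dl n1).toNat with hdn
      have hdnpos : dn ≠ 0 := by omega
      have hcast : (dn : Int) = pvGetD dl n2 - pvGetD dl n1 := by omega
      have hKeq : PySem.Int.bitLength ((dn : Nat) : Int) =
          PySem.Int.bitLength (pvGetD dl n1 - pvGetD dl n2) := by
        rw [hcast, show pvGetD dl n1 - pvGetD dl n2 = -(pvGetD dl n2 - pvGetD dl n1) by ring,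
          PySem.Int.bitLength_neg]
      have hD : min (pvGetD dl n1) (pvGetD dl n2) = pvGetD dl n1 :=
        min_eq_left (le_of_lt hlt)
      have hA := pvMainPass dl st (min (pvGetD dl n1) (pvGetD dl n2))
        (PySem.Int.bitLength (pvGetD dl n1 - pvGetD dl n2)) H0 HD n2 h02 hIn2.2 dn hdnpos
        (le_of_eq hKeq) (by rw [hD]; omega)
      have hfuel : (pvGetD dl n1 - pvGetD dl n2).natAbs = dn := by omega
      have hgtf : ¬ pvGetD dl n1 > pvGetD dl n2 := by omega
      have hwhile : pvWhileA dl st (dn + 1) n1 n2 (pvGetD dl n1) (pvGetD dl n2) 1000000 0 =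
          (n1, ((pvStep st 0)^[dn] (n2, 1000000, 0)).1, pvGetD dl n1, pvGetD dl n1,
           ((pvStep st 0)^[dn] (n2, 1000000, 0)).2.1,
           ((pvStep st 0)^[dn] (n2, 1000000, 0)).2.2) := by
        simp only [pvWhileA]
        rw [if_neg heq, if_neg hgtf]
        rw [show (pvGetD dl n2 - pvGetD dl n1).toNat = dn from rfl]
        rw [show pvBin dn = pvBinAux dn from by rw [pvBin, if_neg hdnpos]]
        rw [hA, hD]
        exact pvWhileA_stop dl st dn (by omega) n1 _ (pvGetD dl n1) _ _
      simp only [equailze_depth, equailze_depth_alt]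
      rw [hfuel, hwhile]
      rw [if_neg hgtf]
      rw [show (pvGetD dl n2 - pvGetD dl n1).toNat = dn from rfl, pvWalkB_eq]
    · -- node_1 is deeper
      set dn : Nat := (pvGetD dl n1 - pvGetD dl n2).toNat with hdn
      have hdnpos : dn ≠ 0 := by omega
      have hcast : (dn : Int) = pvGetD dl n1 - pvGetD dl n2 := by omega
      have hKeq : PySem.Int.bitLength ((dn : Nat) : Int) =
          PySem.Int.bitLength (pvGetD dl n1 - pvGetD dl n2) := by rw [hcast]
      have hD : min (pvGetD dl n1) (pvGetD dl n2) = pvGetD dl n2 :=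
        min_eq_right (le_of_lt hgt)
      have hA := pvMainPass dl st (min (pvGetD dl n1) (pvGetD dl n2))
        (PySem.Int.bitLength (pvGetD dl n1 - pvGetD dl n2)) H0 HD n1 h01 hIn1.2 dn hdnpos
        (le_of_eq hKeq) (by rw [hD]; omega)
      have hfuel : (pvGetD dl n1 - pvGetD dl n2).natAbs = dn := by omega
      have hwhile : pvWhileA dl st (dn + 1) n1 n2 (pvGetD dl n1) (pvGetD dl n2) 1000000 0 =
          (((pvStep st 0)^[dn] (n1, 1000000, 0)).1, n2, pvGetD dl n2, pvGetD dl n2,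
           ((pvStep st 0)^[dn] (n1, 1000000, 0)).2.1,
           ((pvStep st 0)^[dn] (n1, 1000000, 0)).2.2) := by
        simp only [pvWhileA]
        rw [if_neg heq, if_pos hgt]
        rw [show (pvGetD dl n1 - pvGetD dl n2).toNat = dn from rfl]
        rw [show pvBin dn = pvBinAux dn from by rw [pvBin, if_neg hdnpos]]
        rw [hA, hD]
        exact pvWhileA_stop dl st dn (by omega) _ n2 (pvGetD dl n2) _ _
      simp only [equailze_depth, equailze_depth_alt]
      rw [hfuel, hwhile]
      rw [if_pos hgt]
      rw [show (pvGetD dl n1 - pvGetD dl n2).toNat = dn from rfl, pvWalkB_eq]
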